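-- pv_equiv track=rewrite | github.com/amurshak/congressMCP | congress_api/features/treaties.py | format_treaties_list
-- ===== SOURCE A (Python) =====
-- from typing import Dict, List, Any, Optional
--
-- def format_treaty_item(item: Dict[str, Any]) -> str:
--     """Formats a single treaty item for display in a list."""
--     lines = [
--         f"Congress Received: {item.get('congressReceived', 'N/A')}",
--         f"Congress Considered: {item.get('congressConsidered', 'N/A')}",
--         f"Treaty Number: {item.get('number', 'N/A')}"
--     ]
--
--     # Add suffix if available
--     if 'suffix' in item and item['suffix']:
--         lines.append(f"Suffix: {item.get('suffix', 'N/A')}")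
--
--     # Add topic if available
--     if 'topic' in item:
--         lines.append(f"Topic: {item.get('topic', 'N/A')}")
--
--     # Add transmitted date if available
--     if 'transmittedDate' in item:
--         lines.append(f"Transmitted Date: {item.get('transmittedDate', 'N/A')}")
--
--     # Add update date if available
--     if 'updateDate' in item:
--         lines.append(f"Update Date: {item.get('updateDate', 'N/A')}")
--
--     # Add URL if available
--     if 'url' in item:
--         lines.append(f"URL: {item.get('url', 'N/A')}")
--
--     return "\n".join(lines)
--
-- def format_treaties_list(data: Dict[str, Any]) -> str:
--     """Formats a list of treaties."""
--     if not data or 'treaties' not in data or not data['treaties']: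
--         return "No treaties available."
--
--     treaties = data['treaties']
--     formatted_treaties = []
--
--     for treaty in treaties:
--         formatted_treaties.append(format_treaty_item(treaty))
--
--     return "\n\n".join(formatted_treaties)
-- ===== SOURCE B (Python) =====
-- # B: table-driven formatter — one declarative field spec replaces the hard-coded line sequence.
-- FIELDS = [
--     ("congressReceived", "Congress Received", "always"),
--     ("congressConsidered", "Congress Considered", "always"),
--     ("number", "Treaty Number", "always"),
--     ("suffix", "Suffix", "truthy"),
--     ("topic", "Topic", "present"),
--     ("transmittedDate", "Transmitted Date", "present"),
--     ("updateDate", "Update Date", "present"),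
--     ("url", "URL", "present"),
-- ]
--
-- def _format_item(item):
--     lines = []
--     for key, label, mode in FIELDS:
--         if mode == "always" or (mode == "truthy" and item.get(key)) or (mode == "present" and key in item):
--             lines.append(f"{label}: {item.get(key, 'N/A')}")
--     return "\n".join(lines)
--
-- def format_treaties_list(data):
--     treaties = (data or {}).get('treaties')
--     if not treaties:
--         return "No treaties available."
--     return "\n\n".join(_format_item(t) for t in treaties)
-- ===== Notes on version B (the rewrite author's own statement) =====
-- stated objective: simpler
-- what changed: Replaces the hard-coded sequence of per-field if-blocks with one declarative field table (key, label, inclusion mode) folded in a single loop, and replaces the wrapper's three-clause guard with a single .get('treaties') lookup.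
import Mathlib
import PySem

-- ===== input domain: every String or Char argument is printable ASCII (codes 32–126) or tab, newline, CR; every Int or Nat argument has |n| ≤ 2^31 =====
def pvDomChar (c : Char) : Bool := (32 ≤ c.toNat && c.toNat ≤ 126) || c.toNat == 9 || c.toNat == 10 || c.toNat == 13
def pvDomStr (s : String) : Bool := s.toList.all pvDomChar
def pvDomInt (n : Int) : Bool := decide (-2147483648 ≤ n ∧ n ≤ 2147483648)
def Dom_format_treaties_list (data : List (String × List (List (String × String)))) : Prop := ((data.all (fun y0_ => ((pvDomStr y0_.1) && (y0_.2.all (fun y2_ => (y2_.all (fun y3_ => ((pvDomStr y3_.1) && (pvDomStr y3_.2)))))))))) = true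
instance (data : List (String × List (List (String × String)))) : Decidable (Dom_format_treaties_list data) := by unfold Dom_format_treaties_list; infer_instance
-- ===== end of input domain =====

-- B is a table-driven rewrite of A's hard-coded line sequence (objective: simpler); return values only, no mutation.

-- ===== PORT A =====
def pvFmtItemA (item : List (String × String)) : String :=
  let d := PySem.Dict.mk item
  let lines : List String := [
    "Congress Received: " ++ d.getD "congressReceived" "N/A",
    "Congress Considered: " ++ d.getD "congressConsidered" "N/A",
    "Treaty Number: " ++ d.getD "number" "N/A"]
  let lines := if d.contains "suffix" && d.getD "suffix" "" != "" then
      lines ++ ["Suffix: " ++ d.getD "suffix" "N/A"] else lines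
  let lines := if d.contains "topic" then
      lines ++ ["Topic: " ++ d.getD "topic" "N/A"] else lines
  let lines := if d.contains "transmittedDate" then
      lines ++ ["Transmitted Date: " ++ d.getD "transmittedDate" "N/A"] else lines
  let lines := if d.contains "updateDate" then
      lines ++ ["Update Date: " ++ d.getD "updateDate" "N/A"] else lines
  let lines := if d.contains "url" then
      lines ++ ["URL: " ++ d.getD "url" "N/A"] else lines
  PySem.Str.join "\n" lines

def format_treaties_list (data : List (String × List (List (String × String)))) : String :=
  let d := PySem.Dict.mk data
  if data.isEmpty || !d.contains "treaties" || (d.getD "treaties" []).isEmpty then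
    "No treaties available."
  else
    let treaties := d.getD "treaties" []
    let formatted := treaties.foldl (fun acc t => acc ++ [pvFmtItemA t]) []
    PySem.Str.join "\n\n" formatted

-- ===== PORT B =====
def pvFields : List (String × String × String) := [
  ("congressReceived", "Congress Received", "always"),
  ("congressConsidered", "Congress Considered", "always"),
  ("number", "Treaty Number", "always"),
  ("suffix", "Suffix", "truthy"),
  ("topic", "Topic", "present"),
  ("transmittedDate", "Transmitted Date", "present"),
  ("updateDate", "Update Date", "present"),
  ("url", "URL", "present")]

def pvFmtItemB (item : List (String × String)) : String :=
  let d := PySem.Dict.mk item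
  let lines := pvFields.foldl (fun acc f =>
    if f.2.2 == "always" || (f.2.2 == "truthy" && d.getD f.1 "" != "") ||
       (f.2.2 == "present" && d.contains f.1) then
      acc ++ [f.2.1 ++ ": " ++ d.getD f.1 "N/A"] else acc) []
  PySem.Str.join "\n" lines

def format_treaties_list_alt (data : List (String × List (List (String × String)))) : String :=
  match (PySem.Dict.mk data).get? "treaties" with
  | none => "No treaties available."
  | some ts => if ts.isEmpty then "No treaties available."
               else PySem.Str.join "\n\n" (ts.map pvFmtItemB)

-- ===== PRECONDITION & SPEC =====
def Spec_format_treaties_list (data : List (String × List (List (String × String)))) (out : String) : Prop := out = format_treaties_list_alt data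
instance (data : List (String × List (List (String × String)))) (out : String) : Decidable (Spec_format_treaties_list data out) := by unfold Spec_format_treaties_list; infer_instance

-- ===== CLAIM (what is proved, stated in full; the proofs are below) =====
def Claim_equal_format_treaties_list : Prop := ∀ (data : List (String × List (List (String × String)))), Dom_format_treaties_list data → Spec_format_treaties_list data (format_treaties_list data)

-- ===== LEMMAS AND PROOFS =====

lemma contains_and_getD (d : PySem.Dict String String) (k : String) :
    (d.contains k && d.getD k "" != "") = (d.getD k "" != "") := by
  cases h : d.contains k
  · simp [PySem.Dict.getD_of_not_contains (d := d) (k := k) ("" : String) h]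
  · simp

set_option maxHeartbeats 2000000 in
lemma item_eq (item : List (String × String)) : pvFmtItemA item = pvFmtItemB item := by
  unfold pvFmtItemA pvFmtItemB pvFields
  simp only [List.foldl_cons, List.foldl_nil, contains_and_getD]
  simp only [Bool.true_or, Bool.false_and, Bool.true_and, Bool.false_or, Bool.or_false,
    show ("always" == "always") = true from rfl, show ("truthy" == "always") = false from rfl,
    show ("truthy" == "truthy") = true from rfl, show ("truthy" == "present") = false from rfl,
    show ("present" == "always") = false from rfl, show ("present" == "truthy") = false from rfl,
    show ("present" == "present") = true from rfl]
  split_ifs <;> rfl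

lemma foldl_append_eq_map {α β : Type} (f : α → β) (l : List α) (acc : List β) :
    l.foldl (fun a t => a ++ [f t]) acc = acc ++ l.map f := by
  induction l generalizing acc with
  | nil => simp
  | cons x xs ih => simp [List.foldl_cons, ih]

-- ===== VERDICT (by name: the statement is the Claim_ definition above) =====
theorem format_treaties_list_spec : Claim_equal_format_treaties_list := by
  intro data _
  unfold Spec_format_treaties_list format_treaties_list format_treaties_list_alt
  cases h : (PySem.Dict.mk data).get? "treaties" with
  | none =>
      have hc : (PySem.Dict.mk data).contains "treaties" = false := by
        rw [PySem.Dict.contains_eq_isSome_get?, h]; rfl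
      simp [hc]
  | some ts =>
      have hc : (PySem.Dict.mk data).contains "treaties" = true := by
        rw [PySem.Dict.contains_eq_isSome_get?, h]; rfl
      have hne : data.isEmpty = false := by
        cases data with
        | nil => simp [PySem.Dict.get?] at h
        | cons a l => rfl
      have hg : (PySem.Dict.mk data).getD "treaties" [] = ts := by
        rw [PySem.Dict.getD_eq_get?_getD, h]; rfl
      simp only [hc, hne, hg, Bool.not_true, Bool.false_or, Bool.or_self]
      by_cases he : ts.isEmpty = true
      · simp [he]
      · rw [if_neg he, if_neg he, foldl_append_eq_map, List.nil_append]
        exact congrArg _ (List.map_congr_left fun x _ => item_eq x)
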